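-- pv_equiv track=rewrite | github.com/Epsilon314159/BEMAS | agents/BEMAS/step_trainer.py | density_within_observable_space
-- ===== SOURCE A (Python) =====
-- def density_within_observable_space(agent_positions, observable_range=(7, 7)):
--     densities = []
--     for x, y in agent_positions:
--         count = 0
--         x_min, x_max = x - observable_range[0] // 2, x + observable_range[0] // 2
--         y_min, y_max = y - observable_range[1] // 2, y + observable_range[1] // 2
--         for nx, ny in agent_positions:
--             if x_min <= nx <= x_max and y_min <= ny <= y_max and (nx, ny) != (x, y):
--                 count += 1
--         densities.append(count)
--     return densities
-- ===== SOURCE B (Python) =====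
-- def density_within_observable_space(agent_positions, observable_range=(7, 7)):
--     hx = observable_range[0] // 2
--     hy = observable_range[1] // 2
--     if hx < 0 or hy < 0:
--         # empty observable window: nobody is visible
--         return [0] * len(agent_positions)
--     cnt = {}
--     for p in agent_positions:
--         cnt[p] = cnt.get(p, 0) + 1
--     density = {}
--     for (x, y), c in cnt.items():
--         s = 0
--         for (nx, ny), c2 in cnt.items():
--             if x - hx <= nx <= x + hx and y - hy <= ny <= y + hy:
--                 s += c2
--         # everyone in the window except the agents sharing our own cell
--         density[(x, y)] = s - c
--     return [density[p] for p in agent_positions]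
-- ===== Notes on version B (the rewrite author's own statement) =====
-- stated objective: alternative
-- what changed: B builds a Counter of positions once and computes one density per distinct position (window sum of multiplicities minus the own-cell multiplicity, with an early all-zeros return for an empty window), answering each agent by lookup, instead of A's all-pairs rescan per agent.
import Mathlib
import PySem

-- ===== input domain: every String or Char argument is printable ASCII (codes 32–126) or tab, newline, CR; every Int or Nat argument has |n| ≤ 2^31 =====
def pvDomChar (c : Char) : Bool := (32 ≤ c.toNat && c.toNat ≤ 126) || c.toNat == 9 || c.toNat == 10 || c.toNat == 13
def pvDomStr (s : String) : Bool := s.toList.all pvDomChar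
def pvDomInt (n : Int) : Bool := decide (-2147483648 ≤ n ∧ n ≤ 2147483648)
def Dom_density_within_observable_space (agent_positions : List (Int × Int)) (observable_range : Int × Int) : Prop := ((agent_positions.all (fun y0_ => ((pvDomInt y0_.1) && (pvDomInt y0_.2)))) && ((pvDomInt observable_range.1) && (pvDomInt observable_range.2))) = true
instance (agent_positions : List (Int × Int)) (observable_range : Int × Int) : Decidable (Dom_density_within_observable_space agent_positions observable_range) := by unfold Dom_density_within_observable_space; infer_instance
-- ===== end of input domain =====

-- B restructures A's per-agent rescan of all agents: it builds a Counter of positions once,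
-- computes one density per DISTINCT position (window sum of multiplicities minus the own-cell
-- multiplicity) and answers each agent by dictionary lookup.

-- ===== PORT A =====
-- literal transliteration of A: for each agent, scan all agents and count those inside the window and not at the same position
def density_within_observable_space (agent_positions : List (Int × Int)) (observable_range : Int × Int) : List Int :=
  agent_positions.foldl (fun densities p =>
    let x := p.1
    let y := p.2
    let x_min := x - PySem.Int.floordiv observable_range.1 2
    let x_max := x + PySem.Int.floordiv observable_range.1 2
    let y_min := y - PySem.Int.floordiv observable_range.2 2
    let y_max := y + PySem.Int.floordiv observable_range.2 2
    let count : Int := agent_positions.foldl (fun c q =>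
      if x_min ≤ q.1 ∧ q.1 ≤ x_max ∧ y_min ≤ q.2 ∧ q.2 ≤ y_max ∧ q ≠ (x, y) then c + 1 else c) 0
    densities ++ [count]) []

-- ===== PORT B =====
-- literal transliteration of Source B: Counter of positions, one density per distinct position, lookup per agent
def density_within_observable_space_alt (agent_positions : List (Int × Int)) (observable_range : Int × Int) : List Int :=
  let hx := PySem.Int.floordiv observable_range.1 2
  let hy := PySem.Int.floordiv observable_range.2 2
  if hx < 0 ∨ hy < 0 then
    List.replicate agent_positions.length 0
  else
    let cnt : PySem.Dict (Int × Int) Int :=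
      agent_positions.foldl (fun d p => d.insert p (d.getD p 0 + 1)) PySem.Dict.empty
    let density : PySem.Dict (Int × Int) Int :=
      cnt.items.foldl (fun d it =>
        let s : Int := cnt.items.foldl (fun s it2 =>
          if it.1.1 - hx ≤ it2.1.1 ∧ it2.1.1 ≤ it.1.1 + hx ∧ it.1.2 - hy ≤ it2.1.2 ∧ it2.1.2 ≤ it.1.2 + hy
          then s + it2.2 else s) 0
        d.insert it.1 (s - it.2)) PySem.Dict.empty
    agent_positions.map (fun p => density.getD p 0)

-- ===== PRECONDITION & SPEC =====
def Spec_density_within_observable_space (agent_positions : List (Int × Int)) (observable_range : Int × Int) (out : List Int) : Prop := out = density_within_observable_space_alt agent_positions observable_range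
instance (agent_positions : List (Int × Int)) (observable_range : Int × Int) (out : List Int) : Decidable (Spec_density_within_observable_space agent_positions observable_range out) := by unfold Spec_density_within_observable_space; infer_instance

-- ===== CLAIM (what is proved, stated in full; the proofs are below) =====
def Claim_equal_density_within_observable_space : Prop := ∀ (agent_positions : List (Int × Int)) (observable_range : Int × Int), Dom_density_within_observable_space agent_positions observable_range → Spec_density_within_observable_space agent_positions observable_range (density_within_observable_space agent_positions observable_range)

-- ===== LEMMAS AND PROOFS =====

-- q lies in p's observable window of half-widths hx, hy
def pvInW (hx hy : Int) (p q : Int × Int) : Bool :=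
  decide (p.1 - hx ≤ q.1 ∧ q.1 ≤ p.1 + hx ∧ p.2 - hy ≤ q.2 ∧ q.2 ≤ p.2 + hy)

-- A's inner loop is a countP
lemma pvA_count (ps : List (Int × Int)) (hx hy : Int) (p : Int × Int) :
    ps.foldl (fun c q => if p.1 - hx ≤ q.1 ∧ q.1 ≤ p.1 + hx ∧ p.2 - hy ≤ q.2 ∧ q.2 ≤ p.2 + hy ∧ q ≠ p then c + 1 else c) 0
      = (ps.countP (fun q => pvInW hx hy p q && decide (q ≠ p)) : Int) := by
  have h := PySem.List.foldl_count_if (fun q => pvInW hx hy p q && decide (q ≠ p)) ps 0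
  simpa [pvInW, and_assoc] using h

-- A as a map over the agents
lemma pvA_eq_map (ps : List (Int × Int)) (r : Int × Int) :
    density_within_observable_space ps r
      = ps.map (fun p => (ps.countP (fun q =>
          pvInW (PySem.Int.floordiv r.1 2) (PySem.Int.floordiv r.2 2) p q && decide (q ≠ p)) : Int)) := by
  unfold density_within_observable_space
  rw [PySem.List.foldl_append_singleton_eq_map
    (f := fun p => ps.foldl (fun c q =>
      if p.1 - PySem.Int.floordiv r.1 2 ≤ q.1 ∧ q.1 ≤ p.1 + PySem.Int.floordiv r.1 2 ∧
         p.2 - PySem.Int.floordiv r.2 2 ≤ q.2 ∧ q.2 ≤ p.2 + PySem.Int.floordiv r.2 2 ∧ q ≠ p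
      then c + 1 else c) 0)]
  simp only [List.nil_append]
  exact List.map_congr_left (fun p _ => pvA_count ps _ _ p)

-- conditional accumulation is a sum over the filtered list
lemma pvFoldl_add_if {α : Type} (P : α → Prop) [DecidablePred P] (g : α → Int) (l : List α) (a : Int) :
    l.foldl (fun s x => if P x then s + g x else s) a
      = a + ((l.filter (fun x => decide (P x))).map g).sum := by
  induction l generalizing a with
  | nil => simp
  | cons x t ih => by_cases h : P x <;> simp [h, ih, add_assoc]

-- indicator sum over a Nodup list
lemma pvSum_indicator {α : Type} [DecidableEq α] (L : List α) (hnd : L.Nodup) (q : α) :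
    (L.map (fun k => if k = q then (1 : Int) else 0)).sum = if q ∈ L then 1 else 0 := by
  induction L with
  | nil => simp
  | cons x t ih =>
    rw [List.nodup_cons] at hnd
    by_cases hx : x = q
    · subst hx
      simp [hnd.1, ih hnd.2]
    · simp only [List.map_cons, List.sum_cons, if_neg hx, zero_add, ih hnd.2, List.mem_cons]
      simp [Ne.symm hx]

-- sum of multiplicities over the distinct in-window positions = number of in-window agents
lemma pvSum_count (K : List (Int × Int)) (ps : List (Int × Int)) (P : (Int × Int) → Bool)
    (hnd : K.Nodup) (hK : ∀ q ∈ ps, P q = true → q ∈ K) :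
    ((K.filter P).map (fun k => (ps.count k : Int))).sum = (ps.countP P : Int) := by
  induction ps with
  | nil => simp
  | cons q t ih =>
    have hK' : ∀ x ∈ t, P x = true → x ∈ K := fun x hx => hK x (List.mem_cons_of_mem _ hx)
    have hmap : (K.filter P).map (fun k => (List.count k (q :: t) : Int))
        = (K.filter P).map (fun k => (List.count k t : Int) + (if k = q then 1 else 0)) := by
      apply List.map_congr_left
      intro k _
      rw [List.count_cons]
      by_cases h : k = q
      · simp [h]
      · simp [h, Ne.symm h]
    rw [hmap, PySem.List.sum_map_add_int, ih hK',
        pvSum_indicator (K.filter P) (hnd.filter P) q, List.countP_cons]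
    by_cases hP : P q = true
    · have hqK : q ∈ K.filter P := List.mem_filter.mpr ⟨hK q List.mem_cons_self hP, hP⟩
      simp only [if_pos hqK, if_pos hP]
      push_cast
      ring
    · have hqK : q ∉ K.filter P := fun h => hP (List.mem_filter.mp h).2
      simp [hP, hqK]

-- folding inserts whose keys avoid k leaves the lookup at k unchanged
lemma pvGetD_foldl_insert_not_mem {κ ν : Type} [BEq κ] [LawfulBEq κ]
    (f : (κ × ν) → ν) (L : List (κ × ν)) (d0 : PySem.Dict κ ν) (k : κ) (dflt : ν)
    (hk : k ∉ L.map Prod.fst) :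
    (L.foldl (fun d i => d.insert i.1 (f i)) d0).getD k dflt = d0.getD k dflt := by
  induction L generalizing d0 with
  | nil => rfl
  | cons i t ih =>
    simp only [List.map_cons, List.mem_cons, not_or] at hk
    rw [List.foldl_cons, ih _ hk.2, PySem.Dict.getD_insert_of_ne _ _ _ hk.1]

-- with Nodup keys, the built dict maps each item's key to its computed value
lemma pvGetD_foldl_insert_mem {κ ν : Type} [BEq κ] [LawfulBEq κ]
    (f : (κ × ν) → ν) (L : List (κ × ν)) (d0 : PySem.Dict κ ν) (dflt : ν) (it : κ × ν)
    (hnd : (L.map Prod.fst).Nodup) (hit : it ∈ L) :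
    (L.foldl (fun d i => d.insert i.1 (f i)) d0).getD it.1 dflt = f it := by
  induction L generalizing d0 with
  | nil => cases hit
  | cons i t ih =>
    simp only [List.map_cons, List.nodup_cons] at hnd
    rcases List.mem_cons.mp hit with h | h
    · subst h
      rw [List.foldl_cons, pvGetD_foldl_insert_not_mem f t _ _ _ hnd.1,
          PySem.Dict.getD_insert_self]
    · rw [List.foldl_cons]
      exact ih _ hnd.2 h

-- splitting A's count: in-window agents minus those sharing p's own cell (which is in its own window)
lemma pvCount_split (ps : List (Int × Int)) (p : Int × Int) (hx hy : Int)
    (hhx : 0 ≤ hx) (hhy : 0 ≤ hy) :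
    (ps.countP (fun q => pvInW hx hy p q && decide (q ≠ p)) : Int)
      = (ps.countP (fun q => pvInW hx hy p q) : Int) - ps.count p := by
  have hself : pvInW hx hy p p = true := by simp [pvInW]; omega
  induction ps with
  | nil => simp
  | cons q t ih =>
    rw [List.countP_cons, List.countP_cons, List.count_cons]
    by_cases hq : q = p
    · subst hq
      simp only [hself, Bool.true_and]
      simp at ih ⊢
      omega
    · by_cases hw : pvInW hx hy p q = true
      · simp [hw, hq] at ih ⊢
        omega
      · simp [hw, hq] at ih ⊢
        omega

-- B as a map over the agents: window sum of multiplicities minus own-cell multiplicity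
lemma pvB_eq_map (ps : List (Int × Int)) (r : Int × Int)
    (hhx : 0 ≤ PySem.Int.floordiv r.1 2) (hhy : 0 ≤ PySem.Int.floordiv r.2 2) :
    density_within_observable_space_alt ps r
      = ps.map (fun p => (ps.countP (fun q =>
          pvInW (PySem.Int.floordiv r.1 2) (PySem.Int.floordiv r.2 2) p q) : Int) - ps.count p) := by
  simp only [density_within_observable_space_alt]
  rw [if_neg (by omega : ¬ (PySem.Int.floordiv r.1 2 < 0 ∨ PySem.Int.floordiv r.2 2 < 0))]
  rw [PySem.Dict.foldl_insert_getD_add_one_eq_counter]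
  apply List.map_congr_left
  intro p hp
  have hnd : ((PySem.Dict.counter ps).items.map Prod.fst).Nodup := by
    rw [PySem.Dict.items_counter, List.map_map]
    have hid : (Prod.fst ∘ fun k : Int × Int => (k, (ps.count k : Int))) = id := rfl
    rw [hid, List.map_id]
    exact PySem.Set.nodup_ofList ps
  have hit : (p, (ps.count p : Int)) ∈ (PySem.Dict.counter ps).items := by
    rw [PySem.Dict.items_counter]
    exact List.mem_map_of_mem ((PySem.Set.mem_ofList ps p).mpr hp)
  rw [pvGetD_foldl_insert_mem
    (f := fun it => (PySem.Dict.counter ps).items.foldl (fun s it2 =>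
      if it.1.1 - PySem.Int.floordiv r.1 2 ≤ it2.1.1 ∧ it2.1.1 ≤ it.1.1 + PySem.Int.floordiv r.1 2 ∧
         it.1.2 - PySem.Int.floordiv r.2 2 ≤ it2.1.2 ∧ it2.1.2 ≤ it.1.2 + PySem.Int.floordiv r.2 2
      then s + it2.2 else s) 0 - it.2)
    _ _ _ _ hnd hit]
  rw [pvFoldl_add_if (P := fun it2 : (Int × Int) × Int =>
      p.1 - PySem.Int.floordiv r.1 2 ≤ it2.1.1 ∧ it2.1.1 ≤ p.1 + PySem.Int.floordiv r.1 2 ∧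
      p.2 - PySem.Int.floordiv r.2 2 ≤ it2.1.2 ∧ it2.1.2 ≤ p.2 + PySem.Int.floordiv r.2 2)
    (g := Prod.snd)]
  rw [PySem.Dict.items_counter, List.filter_map, List.map_map, zero_add]
  have hfun : ((fun it2 : (Int × Int) × Int => decide (
      p.1 - PySem.Int.floordiv r.1 2 ≤ it2.1.1 ∧ it2.1.1 ≤ p.1 + PySem.Int.floordiv r.1 2 ∧
      p.2 - PySem.Int.floordiv r.2 2 ≤ it2.1.2 ∧ it2.1.2 ≤ p.2 + PySem.Int.floordiv r.2 2)) ∘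
      (fun k : Int × Int => (k, (ps.count k : Int))))
      = fun k => pvInW (PySem.Int.floordiv r.1 2) (PySem.Int.floordiv r.2 2) p k := by
    funext k
    simp [pvInW, Function.comp]
  rw [hfun]
  simp only [Function.comp_def]
  rw [pvSum_count (PySem.Set.ofList ps) ps _ (PySem.Set.nodup_ofList ps)
    (fun q hq _ => (PySem.Set.mem_ofList ps q).mpr hq)]

-- ===== VERDICT (by name: the statement is the Claim_ definition above) =====
theorem density_within_observable_space_spec : Claim_equal_density_within_observable_space := by
  intro ps r _
  unfold Spec_density_within_observable_space
  by_cases h : PySem.Int.floordiv r.1 2 < 0 ∨ PySem.Int.floordiv r.2 2 < 0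
  · rw [pvA_eq_map]
    simp only [density_within_observable_space_alt]
    rw [if_pos h]
    have hz : ∀ p ∈ ps, (ps.countP (fun q =>
        pvInW (PySem.Int.floordiv r.1 2) (PySem.Int.floordiv r.2 2) p q && decide (q ≠ p)) : Int) = (0 : Int) := by
      intro p _
      have : ps.countP (fun q =>
          pvInW (PySem.Int.floordiv r.1 2) (PySem.Int.floordiv r.2 2) p q && decide (q ≠ p)) = 0 := by
        rw [List.countP_eq_zero]
        intro q _
        simp only [Bool.and_eq_true, decide_eq_true_eq, pvInW, not_and]
        intro hw
        omega
      exact_mod_cast this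
    rw [List.map_congr_left hz, List.map_const']
  · push Not at h
    rw [pvA_eq_map, pvB_eq_map ps r h.1 h.2]
    apply List.map_congr_left
    intro p hp
    exact pvCount_split ps p _ _ h.1 h.2
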